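-- pv_equiv track=rewrite | github.com/qingyu9243/LeetCode-CookBook | By Company/plaid_round1.py | create_routing_number_mapping_2
-- ===== SOURCE A (Python) =====
-- from typing import Dict, List, Tuple
-- from collections import defaultdict
--
-- def create_routing_number_mapping_2(rn_to_name: List[Dict[str, str]], name_to_bank_id: List[Tuple[str, int]]):
--     #
--     dict_rount_to_bank_list = defaultdict(list)
--     for dict in rn_to_name:
--         for rounting, name in dict.items():
--             dict_rount_to_bank_list[rounting].append(name)
--
--     list_bank_name_ids = defaultdict(list)
--     for bank_name, bank_id in name_to_bank_id:
--         list_bank_name_ids[bank_name].append(bank_id)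
--
--     res = defaultdict(list)
--     for rnt_num, bank_list in dict_rount_to_bank_list.items():
--         for bank in bank_list:
--             if bank in list_bank_name_ids:
--                 res[rnt_num].extend(list_bank_name_ids[bank])
--
--     return res
-- ===== SOURCE B (Python) =====
-- from collections import defaultdict
--
-- def create_routing_number_mapping_2(rn_to_name, name_to_bank_id):
--     # dictionary-free join: flatten the routing dicts once, then for each distinct
--     # routing number (first-occurrence order) compute its ids by a direct nested
--     # comprehension over the occurrence list and the (name, id) pairs
--     occ = [(r, n) for d in rn_to_name for r, n in d.items()]
--     res = defaultdict(list)
--     seen = set()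
--     for r, _ in occ:
--         if r in seen:
--             continue
--         seen.add(r)
--         ids = [bid for rr, nm in occ if rr == r
--                    for name, bid in name_to_bank_id if name == nm]
--         if ids:
--             res[r] = ids
--     return res
-- ===== Notes on version B (the rewrite author's own statement) =====
-- stated objective: alternative
-- what changed: B discards all three of A's grouping/index dicts: it flattens the routing dicts into one occurrence list and computes each distinct routing number's id list directly by a nested comprehension joining the occurrences with the (name,id) pairs, guarded by a seen-set for first-occurrence key order.
import Mathlib
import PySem

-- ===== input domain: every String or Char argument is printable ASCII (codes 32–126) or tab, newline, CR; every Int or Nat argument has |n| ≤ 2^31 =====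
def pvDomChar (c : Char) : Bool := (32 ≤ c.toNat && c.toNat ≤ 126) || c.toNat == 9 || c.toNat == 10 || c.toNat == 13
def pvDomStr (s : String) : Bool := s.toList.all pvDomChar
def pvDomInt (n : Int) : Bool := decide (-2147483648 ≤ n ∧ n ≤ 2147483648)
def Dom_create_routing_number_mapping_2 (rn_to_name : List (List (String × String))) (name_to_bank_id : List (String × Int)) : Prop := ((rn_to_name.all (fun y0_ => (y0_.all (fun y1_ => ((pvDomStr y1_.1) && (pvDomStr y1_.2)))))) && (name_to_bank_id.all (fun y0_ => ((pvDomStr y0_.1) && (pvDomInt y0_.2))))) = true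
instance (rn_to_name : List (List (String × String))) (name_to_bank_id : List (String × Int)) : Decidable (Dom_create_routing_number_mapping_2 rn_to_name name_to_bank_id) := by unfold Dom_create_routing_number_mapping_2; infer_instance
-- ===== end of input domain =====

-- B replaces A's three-dict group-index-and-rescan by a dictionary-free join: flatten the
-- routing dicts once, then compute each distinct routing number's ids directly by a nested
-- scan of the occurrence list against the (name, id) pairs (objective: alternative).

-- ===== PORT A =====
def create_routing_number_mapping_2 (rn_to_name : List (List (String × String))) (name_to_bank_id : List (String × Int)) : List (String × List Int) :=
  let dict_rount_to_bank_list : PySem.Dict String (List String) :=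
    rn_to_name.foldl (fun d inner =>
      (PySem.Dict.ofList inner).items.foldl
        (fun d p => d.modify p.1 [] (fun l => l ++ [p.2])) d) PySem.Dict.empty
  let list_bank_name_ids : PySem.Dict String (List Int) :=
    name_to_bank_id.foldl (fun d p => d.modify p.1 [] (fun l => l ++ [p.2])) PySem.Dict.empty
  let res : PySem.Dict String (List Int) :=
    dict_rount_to_bank_list.items.foldl (fun r q =>
      q.2.foldl (fun r bank =>
        if list_bank_name_ids.contains bank then
          r.modify q.1 [] (fun l => l ++ list_bank_name_ids.getD bank [])
        else r) r) PySem.Dict.empty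
  res.items

-- ===== PORT B =====
def create_routing_number_mapping_2_alt (rn_to_name : List (List (String × String))) (name_to_bank_id : List (String × Int)) : List (String × List Int) :=
  let occ : List (String × String) :=
    rn_to_name.flatMap (fun d => (PySem.Dict.ofList d).items)
  let st : PySem.Set String × PySem.Dict String (List Int) :=
    occ.foldl (fun st p =>
      if PySem.Set.contains st.1 p.1 then st
      else
        let seen' := PySem.Set.add st.1 p.1
        let ids : List Int := occ.flatMap (fun q =>
          if q.1 == p.1 then
            name_to_bank_id.filterMap (fun r => if r.1 == q.2 then some r.2 else none)
          else [])
        if ids = [] then (seen', st.2) else (seen', st.2.insert p.1 ids))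
    (PySem.Set.empty, PySem.Dict.empty)
  st.2.items

-- ===== PRECONDITION & SPEC =====
def Spec_create_routing_number_mapping_2 (rn_to_name : List (List (String × String))) (name_to_bank_id : List (String × Int)) (out : List (String × List Int)) : Prop := out = create_routing_number_mapping_2_alt rn_to_name name_to_bank_id
instance (rn_to_name : List (List (String × String))) (name_to_bank_id : List (String × Int)) (out : List (String × List Int)) : Decidable (Spec_create_routing_number_mapping_2 rn_to_name name_to_bank_id out) := by unfold Spec_create_routing_number_mapping_2; infer_instance

-- ===== CLAIM (what is proved, stated in full; the proofs are below) =====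
def Claim_equal_create_routing_number_mapping_2 : Prop := ∀ (rn_to_name : List (List (String × String))) (name_to_bank_id : List (String × Int)), Dom_create_routing_number_mapping_2 rn_to_name name_to_bank_id → Spec_create_routing_number_mapping_2 rn_to_name name_to_bank_id (create_routing_number_mapping_2 rn_to_name name_to_bank_id)

-- ===== LEMMAS AND PROOFS =====

-- the flattened (routing, name) occurrence list both programs traverse
def pvOcc (rn_to_name : List (List (String × String))) : List (String × String) :=
  rn_to_name.flatMap (fun inner => (PySem.Dict.ofList inner).items)

-- the name -> ids index A builds from name_to_bank_id
def pvLookup (name_to_bank_id : List (String × Int)) : PySem.Dict String (List Int) :=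
  name_to_bank_id.foldl (fun d p => d.modify p.1 [] (fun l => l ++ [p.2])) PySem.Dict.empty

-- ids contributed by one bank name
def pvIds (ntb : List (String × Int)) (n : String) : List Int :=
  if (pvLookup ntb).contains n then (pvLookup ntb).getD n [] else []

-- ids accumulated by a list of bank names
def pvFlat (ntb : List (String × Int)) (ns : List String) : List Int :=
  ns.flatMap (pvIds ntb)

-- final value for one routing number
def pvVal (ntb : List (String × Int)) (occ : List (String × String)) (k : String) : List Int :=
  pvFlat ntb ((occ.filter (fun p => p.1 == k)).map (fun p => p.2))

-- the common normal form both ports are proved equal to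
def pvCanon (rn_to_name : List (List (String × String))) (ntb : List (String × Int)) : List (String × List Int) :=
  (PySem.Set.update ([] : List String) ((pvOcc rn_to_name).map (fun p => p.1))).filterMap
    (fun k => if pvVal ntb (pvOcc rn_to_name) k = [] then none
              else some (k, pvVal ntb (pvOcc rn_to_name) k))

lemma pvLookup_getD (ntb : List (String × Int)) (n : String) :
    (pvLookup ntb).getD n [] = (ntb.filter (fun p => p.1 == n)).map (fun p => p.2) := by
  unfold pvLookup
  rw [PySem.Dict.getD_foldl_modify_append]
  simp [PySem.Dict.getD_empty]

lemma pvLookup_contains_ne_nil (ntb : List (String × Int)) (n : String)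
    (h : (pvLookup ntb).contains n = true) : (pvLookup ntb).getD n [] ≠ [] := by
  have hk : n ∈ (pvLookup ntb).keys := (PySem.Dict.contains_iff_mem_keys _ _).1 h
  unfold pvLookup at hk
  rw [PySem.Dict.keys_foldl_modify_key ntb (fun p => p.1) [] (fun _ p => (fun l => l ++ [p.2]))] at hk
  rw [pvLookup_getD]
  simp only [PySem.Dict.keys_empty, PySem.Set.mem_update] at hk
  rcases hk with h' | hk
  · simp at h'
  · obtain ⟨p, hp, hpn⟩ := List.mem_map.1 hk
    intro hnil
    rw [List.map_eq_nil_iff, List.filter_eq_nil_iff] at hnil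
    exact hnil p hp (by simp [hpn])

lemma modify_append_append (d : PySem.Dict String (List Int)) (k : String) (a b : List Int) :
    (d.modify k [] (fun l => l ++ a)).modify k [] (fun l => l ++ b)
      = d.modify k [] (fun l => l ++ (a ++ b)) := by
  simp [PySem.Dict.modify, PySem.Dict.getD_insert_self, PySem.Dict.insert_insert_self,
    List.append_assoc]

lemma innerA (ntb : List (String × Int)) (ns : List String) (r : PySem.Dict String (List Int)) (k : String) :
    ns.foldl (fun r bank =>
        if (pvLookup ntb).contains bank then
          r.modify k [] (fun l => l ++ (pvLookup ntb).getD bank [])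
        else r) r
      = if pvFlat ntb ns = [] then r else r.modify k [] (fun l => l ++ pvFlat ntb ns) := by
  induction ns generalizing r with
  | nil => simp [pvFlat]
  | cons n ns ih =>
    have hflat : pvFlat ntb (n :: ns) = pvIds ntb n ++ pvFlat ntb ns := by simp [pvFlat, pvIds]
    by_cases hc : (pvLookup ntb).contains n = true
    · have hne := pvLookup_contains_ne_nil ntb n hc
      have hids : pvIds ntb n = (pvLookup ntb).getD n [] := by simp [pvIds, hc]
      simp only [List.foldl_cons, if_pos hc, ih, hflat, hids]
      by_cases h2 : pvFlat ntb ns = []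
      · simp [h2, hne]
      · have : (pvLookup ntb).getD n [] ++ pvFlat ntb ns ≠ [] := by
          simp [List.append_eq_nil_iff, hne]
        simp [h2, this, modify_append_append]
    · have hids : pvIds ntb n = [] := by simp [pvIds, hc]
      simp only [List.foldl_cons, if_neg hc, ih, hflat, hids, List.nil_append]

lemma outerA (v : String → List Int) (ks : List String) (r : PySem.Dict String (List Int))
    (hnd : ks.Nodup) (hc : ∀ k ∈ ks, r.contains k = false) :
    (ks.foldl (fun r k => if v k = [] then r else r.modify k [] (fun l => l ++ v k)) r).items
      = r.items ++ ks.filterMap (fun k => if v k = [] then none else some (k, v k)) := by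
  induction ks generalizing r with
  | nil => simp
  | cons k ks ih =>
    obtain ⟨hk, hnd'⟩ := List.nodup_cons.1 hnd
    have hck : r.contains k = false := hc k (by simp)
    by_cases h : v k = []
    · simp only [List.foldl_cons, List.filterMap_cons]
      rw [show (if v k = [] then r else r.modify k [] fun l => l ++ v k) = r from by simp [h]]
      rw [ih r hnd' (fun k' hk' => hc k' (by simp [hk']))]
      simp [h]
    · have hmod : r.modify k [] (fun l => l ++ v k) = r.insert k (v k) := by
        simp [PySem.Dict.modify, PySem.Dict.getD_of_not_contains r _ hck]
      simp only [List.foldl_cons, List.filterMap_cons]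
      rw [show (if v k = [] then r else r.modify k [] fun l => l ++ v k) = r.insert k (v k) from by
        rw [if_neg h, hmod]]
      rw [ih (r.insert k (v k)) hnd' ?_]
      · rw [PySem.Dict.items_insert_of_not_contains r (v k) hck]
        simp [h, List.append_assoc]
      · intro k' hk'
        rw [PySem.Dict.contains_insert]
        have : k' ≠ k := fun he => hk (he ▸ hk')
        simp [this, hc k' (by simp [hk'])]

lemma portA_eq (rn_to_name : List (List (String × String))) (ntb : List (String × Int)) :
    create_routing_number_mapping_2 rn_to_name ntb = pvCanon rn_to_name ntb := by
  unfold create_routing_number_mapping_2 pvCanon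
  dsimp only
  rw [show (rn_to_name.foldl (fun d inner =>
      (PySem.Dict.ofList inner).items.foldl
        (fun d p => d.modify p.1 [] (fun l => l ++ [p.2])) d) PySem.Dict.empty)
    = (pvOcc rn_to_name).foldl (fun d p => d.modify p.1 [] (fun l => l ++ [p.2])) PySem.Dict.empty
    from (List.foldl_flatMap).symm ▸ rfl]
  rw [show (ntb.foldl (fun d p => d.modify p.1 [] (fun l => l ++ [p.2])) PySem.Dict.empty) = pvLookup ntb from rfl]
  set occ := pvOcc rn_to_name with hocc
  set G := occ.foldl (fun d p => d.modify p.1 [] (fun l => l ++ [p.2])) PySem.Dict.empty with hGdef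
  have hkeys : G.keys = PySem.Set.update ([] : List String) (occ.map (fun p => p.1)) := by
    rw [hGdef, PySem.Dict.keys_foldl_modify_key occ (fun p => p.1) [] (fun _ p => (fun l => l ++ [p.2]))]
    rw [PySem.Dict.keys_empty]
  have hnodup : G.keys.Nodup := by
    rw [hkeys]
    exact PySem.Set.nodup_update _ _ List.nodup_nil
  have hgetD : ∀ k, G.getD k [] = (occ.filter (fun p => p.1 == k)).map (fun p => p.2) := by
    intro k
    rw [hGdef, PySem.Dict.getD_foldl_modify_append]
    simp [PySem.Dict.getD_empty]
  rw [PySem.Dict.items_eq_map_keys G hnodup [], List.foldl_map]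
  have hstep : (fun (r : PySem.Dict String (List Int)) (k : String) =>
        ((k, G.getD k []).2).foldl (fun r bank =>
          if (pvLookup ntb).contains bank then
            r.modify (k, G.getD k []).1 [] (fun l => l ++ (pvLookup ntb).getD bank [])
          else r) r)
      = (fun (r : PySem.Dict String (List Int)) (k : String) =>
          if pvVal ntb occ k = [] then r else r.modify k [] (fun l => l ++ pvVal ntb occ k)) := by
    funext r k
    simp only []
    rw [innerA]
    rw [show pvFlat ntb (G.getD k []) = pvVal ntb occ k from by rw [hgetD k]; rfl]
  rw [hstep]
  rw [outerA (fun k => pvVal ntb occ k) G.keys PySem.Dict.empty hnodup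
    (fun k _ => PySem.Dict.contains_empty k)]
  rw [hkeys]
  simp [show (PySem.Dict.empty : PySem.Dict String (List Int)).items = [] from rfl]

-- ---- B side ----

lemma pvIds_eq_getD (ntb : List (String × Int)) (n : String) :
    pvIds ntb n = (pvLookup ntb).getD n [] := by
  unfold pvIds
  by_cases hc : (pvLookup ntb).contains n = true
  · rw [if_pos hc]
  · rw [if_neg hc, PySem.Dict.getD_of_not_contains _ _ (by simpa using hc)]

lemma filterMap_eq_pvIds (ntb : List (String × Int)) (n : String) :
    ntb.filterMap (fun r => if r.1 == n then some r.2 else none) = pvIds ntb n := by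
  rw [pvIds_eq_getD, pvLookup_getD]
  induction ntb with
  | nil => rfl
  | cons a l ih =>
    by_cases h : (a.1 == n) = true
    · rw [List.filterMap_cons_some (by rw [if_pos h]),
        List.filter_cons_of_pos (p := fun p : String × Int => p.1 == n) h,
        List.map_cons, ih]
    · rw [List.filterMap_cons_none (by rw [if_neg h]),
        List.filter_cons_of_neg (p := fun p : String × Int => p.1 == n) h, ih]

lemma pvVal2_eq (ntb : List (String × Int)) (occ : List (String × String)) (k : String) :
    occ.flatMap (fun q =>
        if q.1 == k then ntb.filterMap (fun r => if r.1 == q.2 then some r.2 else none) else [])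
      = pvVal ntb occ k := by
  unfold pvVal pvFlat
  induction occ with
  | nil => rfl
  | cons p occ ih =>
    by_cases h : (p.1 == k) = true
    · rw [List.flatMap_cons, if_pos h,
        List.filter_cons_of_pos (p := fun q : String × String => q.1 == k) h,
        List.map_cons, List.flatMap_cons, ih, filterMap_eq_pvIds]
    · rw [List.flatMap_cons, if_neg h,
        List.filter_cons_of_neg (p := fun q : String × String => q.1 == k) h,
        ih, List.nil_append]

-- distinct first components of ps not yet in seen, in first-occurrence order
def pvNewKeys (seen : List String) (ps : List (String × String)) : List String :=
  match ps with
  | [] => []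
  | p :: ps =>
    if PySem.Set.contains seen p.1 then pvNewKeys seen ps
    else p.1 :: pvNewKeys (PySem.Set.add seen p.1) ps

lemma contains_add_self (s : List String) (x : String) :
    PySem.Set.contains (PySem.Set.add s x) x = true := by
  rw [PySem.Set.contains_iff, PySem.Set.mem_add]
  exact Or.inr rfl


lemma contains_add_mono (s : List String) (x y : String)
    (h : PySem.Set.contains s y = true) : PySem.Set.contains (PySem.Set.add s x) y = true := by
  rw [PySem.Set.contains_iff] at h ⊢
  rw [PySem.Set.mem_add]
  exact Or.inl h

lemma update_eq_append_newKeys (seen : List String) (ps : List (String × String)) :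
    PySem.Set.update seen (ps.map (fun p => p.1)) = seen ++ pvNewKeys seen ps := by
  induction ps generalizing seen with
  | nil => simp [PySem.Set.update, pvNewKeys]
  | cons p ps ih =>
    rw [List.map_cons, PySem.Set.update_cons, ih (PySem.Set.add seen p.1)]
    by_cases h : PySem.Set.contains seen p.1 = true
    · have hadd : PySem.Set.add seen p.1 = seen :=
        PySem.Set.add_of_mem (by rw [PySem.Set.contains_iff] at h; exact h)
      rw [hadd]
      simp only [pvNewKeys, if_pos h, hadd]
    · have hadd : PySem.Set.add seen p.1 = seen ++ [p.1] :=
        PySem.Set.add_of_not_mem (fun hm => h (by rw [PySem.Set.contains_iff]; exact hm))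
      simp only [pvNewKeys, if_neg h]
      rw [hadd, List.append_assoc]
      rfl

lemma loopB (v : String → List Int) (ps : List (String × String))
    (seen : List String) (res : PySem.Dict String (List Int))
    (hres : ∀ k, res.contains k = true → PySem.Set.contains seen k = true) :
    (ps.foldl (fun (st : PySem.Set String × PySem.Dict String (List Int)) p =>
        if PySem.Set.contains st.1 p.1 then st
        else
          if v p.1 = [] then (PySem.Set.add st.1 p.1, st.2)
          else (PySem.Set.add st.1 p.1, st.2.insert p.1 (v p.1))) (seen, res)).2.items
      = res.items ++ (pvNewKeys seen ps).filterMap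
          (fun k => if v k = [] then none else some (k, v k)) := by
  induction ps generalizing seen res with
  | nil => simp [pvNewKeys]
  | cons p ps ih =>
    by_cases h : PySem.Set.contains seen p.1 = true
    · simp only [List.foldl_cons, if_pos h, pvNewKeys, ih seen res hres]
    · have hmono := fun k hk => contains_add_mono seen p.1 k hk
      by_cases hv : v p.1 = []
      · simp only [List.foldl_cons, if_neg h, if_pos hv, pvNewKeys]
        rw [ih (PySem.Set.add seen p.1) res (fun k hk => hmono k (hres k hk))]
        simp [hv]
      · have hck : res.contains p.1 = false := by
          by_cases hc : res.contains p.1 = true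
          · exact absurd (hres p.1 hc) (by simpa using h)
          · simpa using hc
        simp only [List.foldl_cons, if_neg h, if_neg hv, pvNewKeys]
        rw [ih (PySem.Set.add seen p.1) (res.insert p.1 (v p.1)) ?_]
        · rw [PySem.Dict.items_insert_of_not_contains res (v p.1) hck]
          simp [hv, List.append_assoc]
        · intro k hk
          rw [PySem.Dict.contains_insert] at hk
          rcases Bool.or_eq_true_iff.1 hk with hk | hk
          · have : k = p.1 := by simpa using hk
            subst this
            exact contains_add_self seen p.1
          · exact hmono k (hres k hk)

lemma portB_eq (rn_to_name : List (List (String × String))) (ntb : List (String × Int)) :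
    create_routing_number_mapping_2_alt rn_to_name ntb = pvCanon rn_to_name ntb := by
  unfold create_routing_number_mapping_2_alt pvCanon
  dsimp only
  rw [show (rn_to_name.flatMap (fun d => (PySem.Dict.ofList d).items)) = pvOcc rn_to_name from rfl]
  set occ := pvOcc rn_to_name with hocc
  have hstep : (fun (st : PySem.Set String × PySem.Dict String (List Int)) (p : String × String) =>
      if PySem.Set.contains st.1 p.1 then st
      else
        let seen' := PySem.Set.add st.1 p.1
        let ids : List Int := occ.flatMap (fun q =>
          if q.1 == p.1 then
            ntb.filterMap (fun r => if r.1 == q.2 then some r.2 else none)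
          else [])
        if ids = [] then (seen', st.2) else (seen', st.2.insert p.1 ids))
    = (fun (st : PySem.Set String × PySem.Dict String (List Int)) p =>
        if PySem.Set.contains st.1 p.1 then st
        else
          if pvVal ntb occ p.1 = [] then (PySem.Set.add st.1 p.1, st.2)
          else (PySem.Set.add st.1 p.1, st.2.insert p.1 (pvVal ntb occ p.1))) := by
    funext st p
    simp only [pvVal2_eq ntb occ p.1]
  rw [hstep]
  rw [show (PySem.Set.empty : PySem.Set String) = ([] : List String) from rfl]
  rw [loopB (fun k => pvVal ntb occ k) occ [] PySem.Dict.empty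
    (fun k hk => by rw [PySem.Dict.contains_empty] at hk; exact absurd hk (by simp))]
  rw [update_eq_append_newKeys]
  simp [show (PySem.Dict.empty : PySem.Dict String (List Int)).items = [] from rfl]

-- ===== VERDICT (by name: the statement is the Claim_ definition above) =====
theorem create_routing_number_mapping_2_spec : Claim_equal_create_routing_number_mapping_2 := by
  intro rn_to_name name_to_bank_id _
  unfold Spec_create_routing_number_mapping_2
  rw [portA_eq, portB_eq]
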